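-- pv_equiv track=rewrite | github.com/akma327/GPCR-WaterDynamics | src/analysis/competing-network-analysis/utils.py | or_op
-- ===== SOURCE A (Python) =====
-- def or_op(bitVectors):
-- 	def single_frame_or(bitVectors, frame_index):
-- 		for vec in bitVectors:
-- 			if(vec[frame_index] == 1): return 1
-- 		return 0
--
-- 	or_vector = []
-- 	numFrames = len(bitVectors[0])
-- 	for frame_index in range(numFrames):
-- 		or_vector.append(single_frame_or(bitVectors, frame_index))
--
-- 	return or_vector
-- ===== SOURCE B (Python) =====
-- def or_op(bitVectors):
-- 	numFrames = len(bitVectors[0])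
-- 	or_vector = [0] * numFrames
-- 	for vec in bitVectors:
-- 		for i in range(numFrames):
-- 			if vec[i] == 1:
-- 				or_vector[i] = 1
-- 	return or_vector
-- ===== Notes on version B (the rewrite author's own statement) =====
-- stated objective: alternative
-- what changed: Replaces A's frame-outer scan with an early-returning helper over the vectors by a vector-outer accumulation into a preallocated result array, eliminating the single_frame_or helper; Pre_ excludes empty input and ragged inputs (shorter-than-first vectors), where B itself raises IndexError.
-- outside the precondition, e.g. on or_op([[1], []]): A returns [1], B raises IndexError
import Mathlib
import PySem

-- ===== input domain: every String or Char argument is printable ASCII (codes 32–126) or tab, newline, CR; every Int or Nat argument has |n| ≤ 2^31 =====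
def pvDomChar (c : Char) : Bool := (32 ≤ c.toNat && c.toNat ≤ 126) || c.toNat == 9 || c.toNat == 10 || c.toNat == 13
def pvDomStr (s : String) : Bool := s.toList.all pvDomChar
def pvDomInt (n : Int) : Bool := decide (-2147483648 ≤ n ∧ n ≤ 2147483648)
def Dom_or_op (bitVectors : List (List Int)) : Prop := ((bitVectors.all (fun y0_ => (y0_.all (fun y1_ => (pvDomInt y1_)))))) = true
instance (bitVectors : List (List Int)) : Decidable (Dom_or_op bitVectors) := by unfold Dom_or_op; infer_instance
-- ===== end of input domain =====

-- B replaces A's frame-outer scan (with an early-returning helper over the vectors)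
-- by a vector-outer accumulation into a preallocated result array (objective: alternative).

-- ===== PORT A =====
-- inner helper single_frame_or: scans the vectors in order, early return 1 on vec[frame_index] == 1;
-- returns none where Python raises IndexError (short vector reached before a 1 is found).
def singleFrameOr (vs : List (List Int)) (fi : Int) : Option Int :=
  match vs with
  | [] => some 0
  | vec :: rest =>
    match PySem.List.pyGet? vec fi with
    | none => none
    | some v => if v = 1 then some 1 else singleFrameOr rest fi

-- numFrames = len(bitVectors[0]); Python raises on empty bitVectors (excluded by Pre_),
-- and the .getD 0 default is only reached where Python raises IndexError (also excluded by Pre_).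
def or_op (bitVectors : List (List Int)) : List Int :=
  -- numFrames = len(bitVectors[0]) is inlined
  (PySem.List.pyRange 0 ((bitVectors.headD []).length : Int) 1).map
    (fun fi => (singleFrameOr bitVectors fi).getD 0)

-- ===== PORT B =====
-- or_vector = [0]*numFrames; for each vec, for each i in range(numFrames),
-- set or_vector[i] = 1 when vec[i] == 1 (out-of-range vec[i] raises in Python: excluded by Pre_,
-- here the step is a no-op there).
def or_op_alt (bitVectors : List (List Int)) : List Int :=
  -- numFrames = len(bitVectors[0]) is inlined
  bitVectors.foldl
    (fun acc vec =>
      (List.range (bitVectors.headD []).length).foldl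
        (fun (a : List Int) (i : Nat) =>
          if PySem.List.pyGet? vec (Int.ofNat i) = some 1 then a.set i 1 else a) acc)
    (List.replicate (bitVectors.headD []).length 0)

-- ===== PRECONDITION & SPEC =====
-- Pre_ excludes empty bitVectors (A raises IndexError on bitVectors[0]) and ragged inputs in which
-- some vector is shorter than the first: on those, B itself raises IndexError (it reads every vector
-- at every frame), while A raises on most of them and returns on the rest only when an earlier
-- vector's 1 makes its early return skip the read of the short vector.
def Pre_or_op (bitVectors : List (List Int)) : Prop :=
  bitVectors ≠ [] ∧ ∀ vec ∈ bitVectors, (bitVectors.headD []).length ≤ vec.length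
instance (bitVectors : List (List Int)) : Decidable (Pre_or_op bitVectors) := by
  unfold Pre_or_op; infer_instance

def pvWitness_or_op : List (List Int) := [[1, 0, 0], [0, 0, 1]]

def Spec_or_op (bitVectors : List (List Int)) (out : List Int) : Prop := out = or_op_alt bitVectors
instance (bitVectors : List (List Int)) (out : List Int) : Decidable (Spec_or_op bitVectors out) := by unfold Spec_or_op; infer_instance

-- ===== CLAIM (what is proved, stated in full; the proofs are below) =====
def Claim_equal_or_op : Prop := ∀ (bitVectors : List (List Int)), Dom_or_op bitVectors → Pre_or_op bitVectors → Spec_or_op bitVectors (or_op bitVectors)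

-- ===== LEMMAS AND PROOFS =====

-- A's helper, under in-range frames, returns 1 iff some vector has a 1 at that frame.
lemma singleFrameOr_eq (vs : List (List Int)) (n : Nat) (h : ∀ v ∈ vs, n < v.length) :
    singleFrameOr vs (n : Int) = some (if vs.any (fun v => v.getD n 0 == 1) then 1 else 0) := by
  induction vs with
  | nil => simp [singleFrameOr]
  | cons vec rest ih =>
    have hv : n < vec.length := h vec (by simp)
    have hget : PySem.List.pyGet? vec (n : Int) = some vec[n] := by
      simp [PySem.List.pyGet?_natCast, List.getElem?_eq_getElem hv]
    by_cases h1 : vec[n] = 1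
    · simp [singleFrameOr, hget, h1, List.getElem?_eq_getElem hv]
    · have := ih (fun v hv' => h v (by simp [hv']))
      simp [singleFrameOr, hget, h1, this, List.getElem?_eq_getElem hv]

-- the inner fold of B preserves the accumulator's length
lemma inner_length (c : Nat → Prop) [DecidablePred c] (l : List Nat) (acc : List Int) :
    (l.foldl (fun a i => if c i then a.set i 1 else a) acc).length = acc.length := by
  induction l generalizing acc with
  | nil => rfl
  | cons i l ih => simp only [List.foldl_cons]; rw [ih]; split <;> simp

-- element j of a fold of conditional sets: 1 if some visited index equals j and satisfies c
lemma inner_getD (c : Nat → Prop) [DecidablePred c] (l : List Nat) (acc : List Int) (j : Nat) (hj : j < acc.length) :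
    (l.foldl (fun a i => if c i then a.set i 1 else a) acc).getD j 0
      = if (j ∈ l ∧ c j) then 1 else acc.getD j 0 := by
  induction l generalizing acc with
  | nil => simp
  | cons i l ih =>
    simp only [List.foldl_cons]
    have hlen : j < (if c i then acc.set i 1 else acc).length := by split <;> simpa
    rw [ih _ hlen]
    by_cases hmem : j ∈ l ∧ c j
    · simp [hmem]
    · by_cases hij : i = j
      · subst hij
        by_cases hc : c i
        · have hset : (acc.set i 1).getD i 0 = 1 := by
            rw [List.getD_eq_getElem _ _ (by simpa using hj)]
            exact List.getElem_set_self _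
          simp only [hc, if_true, hset]
          have : i ∈ i :: l ∧ c i := ⟨by simp, hc⟩
          simp [this]
        · simp [hc]
      · have : (j ∈ i :: l ∧ c j) ↔ (j ∈ l ∧ c j) := by
          constructor
          · rintro ⟨hm, hc⟩
            rcases List.mem_cons.mp hm with h | h
            · exact absurd h.symm hij
            · exact ⟨h, hc⟩
          · rintro ⟨hm, hc⟩; exact ⟨List.mem_cons_of_mem _ hm, hc⟩
        rw [if_congr this rfl rfl]
        simp only [hmem, if_false]
        split
        · rw [List.getD_eq_getElem _ _ (by simpa using hj),
            List.getElem_set_ne hij, ← List.getD_eq_getElem _ _ hj]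
        · rfl

-- the outer fold of B preserves the length of the accumulator
lemma outer_length (m : Nat) (vs : List (List Int)) (acc : List Int) :
    (vs.foldl
        (fun acc vec =>
          (List.range m).foldl
            (fun (a : List Int) (i : Nat) =>
              if PySem.List.pyGet? vec (Int.ofNat i) = some 1 then a.set i 1 else a) acc)
        acc).length = acc.length := by
  induction vs generalizing acc with
  | nil => rfl
  | cons vec rest ih => simp only [List.foldl_cons]; rw [ih, inner_length]

-- the outer fold of B: element j becomes 1 iff some vector has a 1 at frame j
lemma outer_getD (m : Nat) (vs : List (List Int)) (acc : List Int)
    (hacc : acc.length = m) (hlen : ∀ v ∈ vs, m ≤ v.length) (j : Nat) (hj : j < m) :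
    (vs.foldl
        (fun acc vec =>
          (List.range m).foldl
            (fun (a : List Int) (i : Nat) =>
              if PySem.List.pyGet? vec (Int.ofNat i) = some 1 then a.set i 1 else a) acc)
        acc).getD j 0
      = if vs.any (fun v => v.getD j 0 == 1) then 1 else acc.getD j 0 := by
  induction vs generalizing acc with
  | nil => simp
  | cons vec rest ih =>
    have hv : j < vec.length := lt_of_lt_of_le hj (hlen vec (by simp))
    simp only [List.foldl_cons]
    have hlen' : ((List.range m).foldl
        (fun (a : List Int) (i : Nat) =>
          if PySem.List.pyGet? vec (Int.ofNat i) = some 1 then a.set i 1 else a)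
        acc).length = m := by rw [inner_length]; exact hacc
    rw [ih _ hlen' (fun v h => hlen v (by simp [h]))]
    rw [inner_getD (fun i => PySem.List.pyGet? vec (Int.ofNat i) = some 1) (List.range m) acc j
      (by omega)]
    by_cases h1 : vec[j] = 1
    · simp [List.getElem?_eq_getElem hv, h1, hj]
    · simp [List.getElem?_eq_getElem hv, h1, hj]

-- ===== VERDICT (by name: the statement is the Claim_ definition above) =====
theorem or_op_spec : Claim_equal_or_op := by
  intro bitVectors _ hpre
  obtain ⟨hne, hlen⟩ := hpre
  unfold Spec_or_op or_op or_op_alt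
  rw [PySem.List.pyRange_zero_nat, List.map_map]
  have hlenB := outer_length (bitVectors.headD []).length bitVectors
    (List.replicate (bitVectors.headD []).length 0)
  apply List.ext_getElem
  · simp only [List.length_map, List.length_range, hlenB, List.length_replicate]
  · intro j hj hj2
    have hjm : j < (bitVectors.headD []).length := by
      simpa using hj
    rw [List.getElem_map, List.getElem_range]
    have hsfo := singleFrameOr_eq bitVectors j
      (fun v hv => lt_of_lt_of_le hjm (hlen v hv))
    simp only [Function.comp_apply, hsfo, Option.getD_some]
    rw [← List.getD_eq_getElem _ 0 hj2,
      outer_getD (bitVectors.headD []).length bitVectors _ (List.length_replicate) hlen j hjm]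
    simp
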